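-- pv_equiv track=rewrite | github.com/Fondamenti18/fondamenti-di-programmazione | students/1811897/homework04/program01.py | trova
-- ===== SOURCE A (Python) =====
-- def trova(file,diz,x):
--     for f in file:
--         if f==x:
--             diz[f]=file[f]
--             if file[f]==[]:
--                 return None
--             else:
--                 for c in file[f][::-1]:
--                     trova(file,diz,c)
--     return diz
-- ===== SOURCE B (Python) =====
-- def trova(file, diz, x):
--     # Iterative DFS with an explicit stack and a visited set: each reachable node is
--     # handled once (A re-traverses already-finished subtrees).  Children are pushed in
--     # forward order so that stack.pop() takes them in A's reversed visiting order.
--     if x not in file: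
--         return diz
--     diz[x] = file[x]
--     if file[x] == []:
--         return None
--     visited = {x}
--     stack = list(file[x])
--     while stack:
--         node = stack.pop()
--         if node in visited or node not in file:
--             continue
--         visited.add(node)
--         diz[node] = file[node]
--         stack.extend(file[node])
--     return diz
-- ===== Notes on version B (the rewrite author's own statement) =====
-- stated objective: alternative
-- what changed: Replaces the naive recursion (which rescans the whole dict on every call and re-traverses already-visited subtrees) by an iterative explicit-stack DFS with a visited set and direct dict lookup, visiting each reachable node at most once.
import Mathlib
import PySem

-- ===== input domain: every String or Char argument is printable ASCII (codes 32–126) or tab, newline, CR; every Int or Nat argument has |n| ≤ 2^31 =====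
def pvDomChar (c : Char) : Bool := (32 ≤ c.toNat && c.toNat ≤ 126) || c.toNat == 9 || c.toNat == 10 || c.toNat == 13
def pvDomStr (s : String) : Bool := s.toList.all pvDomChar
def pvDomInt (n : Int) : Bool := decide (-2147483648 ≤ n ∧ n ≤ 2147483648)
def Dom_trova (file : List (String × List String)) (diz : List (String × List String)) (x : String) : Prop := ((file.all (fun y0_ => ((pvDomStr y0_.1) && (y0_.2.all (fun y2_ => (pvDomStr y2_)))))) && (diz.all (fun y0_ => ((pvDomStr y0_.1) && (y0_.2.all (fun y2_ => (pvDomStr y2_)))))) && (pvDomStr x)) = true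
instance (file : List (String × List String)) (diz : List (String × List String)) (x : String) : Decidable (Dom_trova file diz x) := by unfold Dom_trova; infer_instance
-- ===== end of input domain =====

-- B replaces A's naive recursion by an iterative explicit-stack DFS with a visited set
-- (alternative algorithm, each reachable node handled once); the equivalence proved here
-- is about the RETURN value (both Pythons mutate diz in place, in the same way).


-- ===== PORT A =====
-- Transliteration of A.  The Python recursion diverges (RecursionError) whenever a cycle
-- is reachable from x; the port carries a fuel counter (file.length + 1, enough for every
-- input admitted by Pre_trova) as a pure totality guard.  The association-list arguments
-- are Python dicts, modelled as PySem.Dict values.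
mutual
  -- one call trova(file, diz, x): first component = the returned value (none = Python
  -- None), second component = the dict diz as mutated by the call
  def trovaRec (fuel : Nat) (file : PySem.Dict String (List String))
      (diz : PySem.Dict String (List String)) (x : String) :
      Option (PySem.Dict String (List String)) × PySem.Dict String (List String) :=
    match fuel with
    | 0 => (some diz, diz)
    | fuel + 1 => trovaLoop fuel file file.items diz x
  termination_by (fuel, 0, 0)
  -- 'for f in file: …'; the early 'return None' stops the scan
  def trovaLoop (fuel : Nat) (file : PySem.Dict String (List String))
      (entries : List (String × List String))
      (diz : PySem.Dict String (List String)) (x : String) :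
      Option (PySem.Dict String (List String)) × PySem.Dict String (List String) :=
    match entries with
    | [] => (some diz, diz)                         -- loop over: 'return diz'
    | (f, _) :: rest =>
      if f = x then
        let v := file.getD f []                     -- file[f]
        let diz1 := diz.insert f v                  -- diz[f] = file[f]
        if v = [] then (none, diz1)                 -- 'return None'
        else trovaLoop fuel file rest (trovaKids fuel file v.reverse diz1) x
      else trovaLoop fuel file rest diz x
  termination_by (fuel, 2, entries.length)
  -- 'for c in file[f][::-1]: trova(file, diz, c)'  (xs[::-1] of a whole list is exactly
  -- List.reverse); the recursive calls' return values are ignored, only diz is threaded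
  def trovaKids (fuel : Nat) (file : PySem.Dict String (List String)) (cs : List String)
      (diz : PySem.Dict String (List String)) : PySem.Dict String (List String) :=
    match cs with
    | [] => diz
    | c :: rest => trovaKids fuel file rest (trovaRec fuel file diz c).2
  termination_by (fuel, 1, cs.length)
end

def trova (file : List (String × List String)) (diz : List (String × List String))
    (x : String) : Option (List (String × List String)) :=
  ((trovaRec (file.length + 1) (PySem.Dict.mk file) (PySem.Dict.mk diz) x).1).map
    PySem.Dict.items

-- ===== PORT B =====
-- measures for the termination of B's while-loop (no Python counterpart, pure guards):
-- UCount = number of file entries whose key is not yet visited, CSum = total number of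
-- child occurrences in file
def UCount (file : PySem.Dict String (List String)) (visited : PySem.Set String) : Nat :=
  (file.items.filter (fun p => !(visited.contains p.1))).length
def CSum (file : PySem.Dict String (List String)) : Nat :=
  (file.items.map (fun p => p.2.length)).sum

theorem filter_sublist_of_imp {α : Type} (l : List α) (p q : α → Bool)
    (h : ∀ a, p a = true → q a = true) : (l.filter p).Sublist (l.filter q) := by
  induction l with
  | nil => simp
  | cons a t ih =>
    by_cases hp : p a = true
    · simp [hp, h a hp]; exact ih
    · simp only [List.filter_cons, Bool.not_eq_true] at *
      rw [if_neg (by simp [hp])]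
      by_cases hq : q a = true
      · rw [if_pos hq]; exact ih.cons _
      · rw [if_neg hq]; exact ih

theorem length_filter_lt {α : Type} (l : List α) (p q : α → Bool)
    (h : ∀ a, p a = true → q a = true) (a : α) (ha : a ∈ l) (hq : q a = true)
    (hp : p a = false) : (l.filter p).length < (l.filter q).length := by
  induction l with
  | nil => cases ha
  | cons b t ih =>
    rcases List.mem_cons.mp ha with rfl | hat
    · rw [List.filter_cons_of_neg (by simp [hp]), List.filter_cons_of_pos hq]
      exact Nat.lt_succ_of_le (filter_sublist_of_imp t p q h).length_le
    · by_cases hpb : p b = true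
      · rw [List.filter_cons_of_pos hpb, List.filter_cons_of_pos (h b hpb)]
        exact Nat.succ_lt_succ (ih hat)
      · rw [List.filter_cons_of_neg (by simp [hpb])]
        by_cases hqb : q b = true
        · rw [List.filter_cons_of_pos hqb]
          exact Nat.lt_succ_of_lt (ih hat)
        · rw [List.filter_cons_of_neg (by simp [hqb])]; exact ih hat

theorem contains_true_iff (s : PySem.Set String) (y : String) :
    PySem.Set.contains s y = true ↔ y ∈ s := by
  simp [PySem.Set.contains]

theorem contains_false_iff (s : PySem.Set String) (y : String) :
    PySem.Set.contains s y = false ↔ y ∉ s := by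
  rw [← Bool.not_eq_true, not_iff_not, contains_true_iff]

theorem get?_mem_key (file : PySem.Dict String (List String)) (node : String)
    (cs : List String) (hg : file.get? node = some cs) :
    ∃ p ∈ file.items, p.1 = node ∧ p.2 = cs := by
  unfold PySem.Dict.get? at hg
  cases hfind : List.find? (fun p => p.1 == node) file.items with
  | none => rw [hfind] at hg; cases hg
  | some q =>
    rw [hfind] at hg
    refine ⟨q, List.mem_of_find?_eq_some hfind, ?_, ?_⟩
    · have := List.find?_some hfind; simpa using this
    · simpa using hg

theorem UCount_add_lt (file : PySem.Dict String (List String)) (v : PySem.Set String)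
    (node : String) (cs : List String) (hv : v.contains node = false)
    (hg : file.get? node = some cs) :
    UCount file (v.add node) < UCount file v := by
  unfold UCount
  obtain ⟨p, hpmem, hpkey, -⟩ := get?_mem_key file node cs hg
  apply length_filter_lt _ _ _ ?_ p hpmem
  · simp only [Bool.not_eq_true', contains_false_iff, hpkey]
    exact (contains_false_iff v node).mp hv
  · simp only [Bool.not_eq_false', contains_true_iff, hpkey]
    exact (PySem.Set.mem_add v node node).mpr (Or.inr rfl)
  · intro a ha
    have h : (v.add node).contains a.1 = false := by simpa using ha
    have : a.1 ∉ v.add node := (contains_false_iff _ _).mp h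
    have : a.1 ∉ v := fun hm => this ((PySem.Set.mem_add v node a.1).mpr (Or.inl hm))
    simpa using (contains_false_iff v a.1).mpr this

theorem len_le_CSum (file : PySem.Dict String (List String)) (node : String)
    (cs : List String) (hg : file.get? node = some cs) : cs.length ≤ CSum file := by
  unfold CSum
  obtain ⟨p, hpmem, -, rfl⟩ := get?_mem_key file node cs hg
  exact List.single_le_sum (fun _ _ => Nat.zero_le _) _ (List.mem_map_of_mem hpmem)

-- B's while-loop: explicit stack (its TOP is the head of the list: Python's stack.pop()
-- takes the end of the list, so every pushed child list appears reversed here) and a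
-- visited set; returns the final visited set and the mutated diz
def bloop (file : PySem.Dict String (List String)) (stack : List String)
    (visited : PySem.Set String) (diz : PySem.Dict String (List String)) :
    PySem.Set String × PySem.Dict String (List String) :=
  match stack with
  | [] => (visited, diz)
  | node :: rest =>
    if visited.contains node then bloop file rest visited diz
    else
      match hg : file.get? node with
      | none => bloop file rest visited diz
      | some cs => bloop file (cs.reverse ++ rest) (visited.add node) (diz.insert node cs)
termination_by UCount file visited * (CSum file + 1) + stack.length
decreasing_by
  · simp only [List.length_cons]; omega
  · simp only [List.length_cons]; omega
  · have h1 := UCount_add_lt file visited node cs (by simp_all) hg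
    have h2 := len_le_CSum file node cs hg
    have h3 : (UCount file (visited.add node) + 1) * (CSum file + 1) ≤
        UCount file visited * (CSum file + 1) := Nat.mul_le_mul_right _ h1
    rw [Nat.succ_mul] at h3
    simp only [List.length_append, List.length_reverse, List.length_cons]
    linarith

def trova_alt (file : List (String × List String)) (diz : List (String × List String))
    (x : String) : Option (List (String × List String)) :=
  match (PySem.Dict.mk file).get? x with
  | none => some diz                                 -- x not in file: return diz
  | some cx =>
    let d1 := (PySem.Dict.mk diz).insert x cx        -- diz[x] = file[x]
    if cx = [] then none                             -- file[x] == []: return None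
    else some (bloop (PySem.Dict.mk file) cx.reverse
                 (PySem.Set.add PySem.Set.empty x) d1).2.items

-- ===== PRECONDITION & SPEC =====
-- one-step children lookup (file[k] as a list; [] when k is not a key)
def childs (file : PySem.Dict String (List String)) (k : String) : List String :=
  (file.get? k).getD []
-- one closure step: add every child of every member
def cloStep (file : PySem.Dict String (List String)) (S : PySem.Set String) :
    PySem.Set String :=
  PySem.Set.update S (S.flatMap (childs file))
-- bounded reachability closure: iterating CSum file + 1 times always reaches the fixpoint
def clo (file : PySem.Dict String (List String)) (start : List String) :
    PySem.Set String :=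
  (cloStep file)^[CSum file + 1] (PySem.Set.ofList start)

-- Pre_trova admits exactly the inputs on which Python A terminates: no node reachable
-- from x may reach itself through one of its children (otherwise A's unbounded recursion
-- raises RecursionError, so Pre_ excludes no input on which A returns).
def Pre_trova (file : List (String × List String)) (diz : List (String × List String))
    (x : String) : Prop :=
  ∀ k ∈ clo (PySem.Dict.mk file) [x],
    k ∉ clo (PySem.Dict.mk file) (childs (PySem.Dict.mk file) k)

instance (file : List (String × List String)) (diz : List (String × List String))
    (x : String) : Decidable (Pre_trova file diz x) := by
  unfold Pre_trova; infer_instance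

def pvWitness_trova : (List (String × List String)) × (List (String × List String)) × String :=
  ([("a", ["b", "c"]), ("b", ["c"])], [("z", [])], "a")

def Spec_trova (file : List (String × List String)) (diz : List (String × List String))
    (x : String) (out : Option (List (String × List String))) : Prop :=
  out = trova_alt file diz x
instance (file : List (String × List String)) (diz : List (String × List String))
    (x : String) (out : Option (List (String × List String))) :
    Decidable (Spec_trova file diz x out) := by unfold Spec_trova; infer_instance

-- ===== CLAIM (what is proved, stated in full; the proofs are below) =====
def Claim_equal_trova : Prop := ∀ (file : List (String × List String)) (diz : List (String × List String)) (x : String), Dom_trova file diz x → Pre_trova file diz x → Spec_trova file diz x (trova file diz x)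

-- ===== LEMMAS AND PROOFS =====

theorem UCount_le_of_subset (file : PySem.Dict String (List String))
    (v w : PySem.Set String)
    (h : ∀ y, y ∈ v → y ∈ w) :
    UCount file w ≤ UCount file v := by
  unfold UCount
  apply List.Sublist.length_le
  apply filter_sublist_of_imp
  intro a ha
  rw [Bool.not_eq_true', contains_false_iff] at *
  exact fun hm => ha (h _ hm)

abbrev DK := PySem.Dict String (List String)

-- ---------- reachability ----------

inductive Reach (file : DK) : String → String → Prop
  | refl (a : String) : Reach file a a
  | tail {a b c : String} : Reach file a b → c ∈ childs file b → Reach file a c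

theorem Reach.trans {file : DK} {a b c : String} (h1 : Reach file a b)
    (h2 : Reach file b c) : Reach file a c := by
  induction h2 with
  | refl => exact h1
  | tail _ hc ih => exact Reach.tail ih hc

theorem Reach.single {file : DK} {a b : String} (h : b ∈ childs file a) :
    Reach file a b := Reach.tail (Reach.refl a) h

-- RP file a b: b is reachable from a through at least one edge
def RP (file : DK) (a b : String) : Prop := ∃ m ∈ childs file a, Reach file m b

-- ---------- the bounded closure computes reachability ----------

def allKids (file : DK) : List String := file.items.flatMap (fun p => p.2)

theorem childs_sub_allKids {file : DK} {k j : String} (hj : j ∈ childs file k) :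
    j ∈ allKids file := by
  unfold childs at hj
  cases hg : file.get? k with
  | none => rw [hg] at hj; cases hj
  | some cs =>
    rw [hg] at hj
    obtain ⟨p, hpmem, -, rfl⟩ := get?_mem_key file k cs hg
    exact List.mem_flatMap.mpr ⟨p, hpmem, hj⟩

theorem mem_foldl_add_left (xs : List String) :
    ∀ (s : PySem.Set String) (y : String), y ∈ s → y ∈ xs.foldl PySem.Set.add s := by
  induction xs with
  | nil => intro s y h; exact h
  | cons b rest ih =>
    intro s y h
    exact ih _ _ ((PySem.Set.mem_add s b y).mpr (Or.inl h))

theorem mem_foldl_add_right (xs : List String) :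
    ∀ (s : PySem.Set String) (y : String), y ∈ xs → y ∈ xs.foldl PySem.Set.add s := by
  induction xs with
  | nil => intro s y h; cases h
  | cons b rest ih =>
    intro s y h
    rcases List.mem_cons.mp h with rfl | hr
    · exact mem_foldl_add_left rest _ _ ((PySem.Set.mem_add s y y).mpr (Or.inr rfl))
    · exact ih _ _ hr

theorem mem_foldl_add_cases (xs : List String) :
    ∀ (s : PySem.Set String) (y : String),
      y ∈ xs.foldl PySem.Set.add s → y ∈ s ∨ y ∈ xs := by
  induction xs with
  | nil => intro s y h; exact Or.inl h
  | cons b rest ih =>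
    intro s y h
    rcases ih _ _ h with hs | hr
    · rcases (PySem.Set.mem_add s b y).mp hs with hs' | rfl
      · exact Or.inl hs'
      · exact Or.inr List.mem_cons_self
    · exact Or.inr (List.mem_cons_of_mem _ hr)

theorem nodup_add {s : PySem.Set String} (h : s.Nodup) (b : String) :
    (PySem.Set.add s b).Nodup := by
  unfold PySem.Set.add
  split
  · exact h
  · next hc =>
    refine List.Nodup.append h (List.nodup_singleton b) ?_
    intro a ha hb'
    rw [List.mem_singleton] at hb'
    subst hb'
    exact absurd ((contains_true_iff s a).mpr ha) (by simp_all)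

theorem foldl_add_append (xs : List String) :
    ∀ s : PySem.Set String, ∃ t, xs.foldl PySem.Set.add s = s ++ t := by
  induction xs with
  | nil => intro s; exact ⟨[], by simp⟩
  | cons b rest ih =>
    intro s
    obtain ⟨t, ht⟩ := ih (PySem.Set.add s b)
    rw [List.foldl_cons]
    by_cases hb : s.contains b = true
    · have hadd : PySem.Set.add s b = s := by unfold PySem.Set.add; rw [if_pos hb]
      rw [hadd] at ht ⊢
      exact ⟨t, ht⟩
    · have hadd : PySem.Set.add s b = s ++ [b] := by
        unfold PySem.Set.add; rw [if_neg hb]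
      rw [hadd] at ht ⊢
      exact ⟨b :: t, by rw [ht, List.append_assoc]; rfl⟩

theorem foldl_add_nodup (xs : List String) :
    ∀ s : PySem.Set String, s.Nodup → (xs.foldl PySem.Set.add s).Nodup := by
  induction xs with
  | nil => intro s h; exact h
  | cons b rest ih => intro s h; exact ih _ (nodup_add h b)

theorem length_le_of_nodup_subset (l E : List String) (hn : l.Nodup)
    (hs : ∀ y ∈ l, y ∈ E) : l.length ≤ E.length := by
  classical
  calc l.length = l.toFinset.card := (List.toFinset_card_of_nodup hn).symm
    _ ≤ E.toFinset.card := Finset.card_le_card (by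
        intro y hy
        rw [List.mem_toFinset] at *
        exact hs y hy)
    _ ≤ E.length := E.toFinset_card_le

theorem cloStep_nodup {file : DK} {S : PySem.Set String} (h : S.Nodup) :
    (cloStep file S).Nodup := by
  unfold cloStep PySem.Set.update
  exact foldl_add_nodup _ _ h

theorem cloStep_mem {file : DK} {S : PySem.Set String} {y : String} (h : y ∈ S) :
    y ∈ cloStep file S := by
  unfold cloStep PySem.Set.update
  exact mem_foldl_add_left _ _ _ h

theorem cloStep_child {file : DK} {S : PySem.Set String} {k j : String}
    (hk : k ∈ S) (hj : j ∈ childs file k) : j ∈ cloStep file S := by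
  unfold cloStep PySem.Set.update
  exact mem_foldl_add_right _ _ _ (List.mem_flatMap.mpr ⟨k, hk, hj⟩)

theorem cloStep_sub {file : DK} {S : PySem.Set String} {y : String}
    (h : y ∈ cloStep file S) : y ∈ S ∨ y ∈ allKids file := by
  unfold cloStep PySem.Set.update at h
  rcases mem_foldl_add_cases _ _ _ h with hs | hf
  · exact Or.inl hs
  · obtain ⟨k, -, hj⟩ := List.mem_flatMap.mp hf
    exact Or.inr (childs_sub_allKids hj)

theorem iter_nodup (file : DK) (S0 : PySem.Set String) (h : S0.Nodup) (i : Nat) :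
    ((cloStep file)^[i] S0).Nodup := by
  induction i generalizing S0 with
  | zero => exact h
  | succ i ih =>
    rw [Function.iterate_succ_apply]
    exact ih _ (cloStep_nodup h)

theorem iter_sub (file : DK) (S0 : PySem.Set String) (i : Nat) :
    ∀ y ∈ (cloStep file)^[i] S0, y ∈ S0 ++ allKids file := by
  induction i generalizing S0 with
  | zero => intro y hy; exact List.mem_append_left _ hy
  | succ i ih =>
    intro y hy
    rw [Function.iterate_succ_apply] at hy
    rcases List.mem_append.mp (ih _ y hy) with hs | hk
    · rcases cloStep_sub hs with h1 | h2
      · exact List.mem_append_left _ h1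
      · exact List.mem_append_right _ h2
    · exact List.mem_append_right _ hk

theorem iter_step_append (file : DK) (S0 : PySem.Set String) (i : Nat) :
    ∃ t, (cloStep file)^[i + 1] S0 = (cloStep file)^[i] S0 ++ t := by
  rw [Function.iterate_succ_apply']
  unfold cloStep PySem.Set.update
  exact foldl_add_append _ _

theorem allKids_length (file : DK) : (allKids file).length = CSum file := by
  unfold allKids CSum
  rw [List.length_flatMap]

-- the iteration reaches a fixpoint within CSum file + 1 steps
theorem clo_fix (file : DK) (start : List String) :
    cloStep file (clo file start) = clo file start := by
  classical
  set f := cloStep file with hf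
  set S0 := PySem.Set.ofList start with hS0
  have hnd : S0.Nodup := PySem.Set.nodup_ofList start
  set N := CSum file + 1 with hN
  by_cases hfix : ∃ i < N, f (f^[i] S0) = f^[i] S0
  · obtain ⟨i, hiN, hfixi⟩ := hfix
    have h1 : f^[N] S0 = f^[i] S0 := by
      have hNi : N = (N - i) + i := by omega
      rw [hNi, Function.iterate_add_apply, Function.iterate_fixed hfixi]
    unfold clo
    rw [← hf, ← hS0, ← hN, h1, hfixi, ← h1]
  · have hfix' : ∀ i, i < N → f (f^[i] S0) ≠ f^[i] S0 := fun i hi heq => hfix ⟨i, hi, heq⟩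
    exfalso
    have step : ∀ i, i < N → (f^[i] S0).length + 1 ≤ (f^[i + 1] S0).length := by
      intro i hi
      obtain ⟨t, ht⟩ := iter_step_append file S0 i
      rw [← hf] at ht
      have htne : t ≠ [] := by
        rintro rfl
        have h2 : f^[i + 1] S0 = f^[i] S0 := by simpa using ht
        rw [Function.iterate_succ_apply'] at h2
        exact absurd h2 (hfix' i hi)
      rw [ht, List.length_append]
      have : 0 < t.length := List.length_pos_iff.mpr htne
      omega
    have grow : ∀ i, i ≤ N → S0.length + i ≤ (f^[i] S0).length := by
      intro i
      induction i with
      | zero => intro _; simp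
      | succ i ih =>
        intro hi
        have h1 := ih (by omega)
        have h2 := step i (by omega)
        omega
    have hbound : (f^[N] S0).length ≤ S0.length + CSum file := by
      have h1 := length_le_of_nodup_subset _ _ (iter_nodup file S0 hnd N)
        (iter_sub file S0 N)
      rw [List.length_append, allKids_length] at h1
      exact h1
    have h3 := grow N le_rfl
    omega

theorem clo_start {file : DK} {start : List String} {y : String} (h : y ∈ start) :
    y ∈ clo file start := by
  unfold clo
  have h0 : y ∈ PySem.Set.ofList start := (PySem.Set.mem_ofList start y).mpr h
  generalize PySem.Set.ofList start = S at h0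
  generalize CSum file + 1 = n
  induction n with
  | zero => exact h0
  | succ n ih =>
    rw [Function.iterate_succ_apply']
    exact cloStep_mem ih

theorem clo_closed {file : DK} {start : List String} {k j : String}
    (hk : k ∈ clo file start) (hj : j ∈ childs file k) : j ∈ clo file start := by
  have h := cloStep_child hk hj
  rwa [clo_fix] at h

theorem reach_clo {file : DK} {start : List String} {a b : String}
    (ha : a ∈ clo file start) (h : Reach file a b) : b ∈ clo file start := by
  induction h with
  | refl => exact ha
  | tail _ hc ih => exact clo_closed ih hc

theorem acyc_of_pre {file diz : List (String × List String)} {x : String}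
    (hpre : Pre_trova file diz x) :
    ∀ k, Reach (PySem.Dict.mk file) x k → ¬ RP (PySem.Dict.mk file) k k := by
  intro k hxk hrp
  obtain ⟨m, hm, hmk⟩ := hrp
  have hk : k ∈ clo (PySem.Dict.mk file) [x] :=
    reach_clo (clo_start (List.mem_singleton.mpr rfl)) hxk
  exact hpre k hk (reach_clo (clo_start hm) hmk)

-- ---------- dict facts: uniform occurrences of a key ----------

def Uniform (d : DK) (k : String) (v : List String) : Prop :=
  d.contains k = true ∧ ∀ p ∈ d.items, p.1 = k → p.2 = v

theorem uniform_insert (d : DK) (k : String) (v : List String) :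
    Uniform (d.insert k v) k v := by
  refine ⟨by simp, ?_⟩
  intro p hp hk
  rcases (PySem.Dict.mem_items_insert d k v p).mp hp with rfl | ⟨-, hne⟩
  · rfl
  · exact absurd hk hne

theorem uniform_insert_other {d : DK} {k' : String} {w : List String} (k : String)
    (v : List String) (hne : k' ≠ k) (h : Uniform d k' w) :
    Uniform (d.insert k v) k' w := by
  refine ⟨by simp [PySem.Dict.contains_insert, h.1], ?_⟩
  intro p hp hk'
  rcases (PySem.Dict.mem_items_insert d k v p).mp hp with rfl | ⟨hmem, -⟩
  · exact (hne hk'.symm).elim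
  · exact h.2 p hmem hk'

theorem insert_noop {d : DK} {k : String} {v : List String} (h : Uniform d k v) :
    d.insert k v = d := by
  apply PySem.Dict.ext
  rw [PySem.Dict.items_insert, if_pos h.1]
  have hmap : ∀ (l : List (String × List String)), (∀ p ∈ l, p.1 = k → p.2 = v) →
      l.map (fun p => if (p.1 == k) = true then (k, v) else p) = l := by
    intro l
    induction l with
    | nil => intro _; rfl
    | cons p rest ih =>
      intro hl
      obtain ⟨a, b⟩ := p
      rw [List.map_cons, ih (fun p' hp' => hl p' (List.mem_cons_of_mem _ hp'))]
      by_cases hpk : (a == k) = true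
      · have h1 : a = k := by simpa using hpk
        have h2 : b = v := hl (a, b) List.mem_cons_self h1
        subst h1
        subst h2
        simp
      · rw [if_neg hpk]
  exact hmap d.items h.2

-- ---------- "every node reachable from c is already finished in d" ----------

def DoneD (file d : DK) (c : String) : Prop :=
  ∀ p, Reach file c p → ∀ cp, file.get? p = some cp → Uniform d p cp

theorem doneD_mono_reach {file d : DK} {c j : String} (h : DoneD file d c)
    (hr : Reach file c j) : DoneD file d j :=
  fun p hp cp hcp => h p (hr.trans hp) cp hcp

-- visited-set invariant: every visited node k carries its file value in d, and is
-- either still "open" (a member of A, the current DFS path) or fully expanded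
def ClosedE (file : DK) (v : PySem.Set String) (d : DK) (A : List String) : Prop :=
  ∀ k ∈ v, ∃ ck, file.get? k = some ck ∧ Uniform d k ck ∧
    (k ∈ A ∨ ∀ j ∈ ck, j ∈ v ∨ file.get? j = none)

theorem doneOf {file : DK} {v : PySem.Set String} {d : DK} {A : List String}
    {j : String} (hce : ClosedE file v d A) (hj : j ∈ v)
    (hA : ∀ a ∈ A, ¬ Reach file j a) : DoneD file d j := by
  have key : ∀ p, Reach file j p → p ∈ v ∨ file.get? p = none := by
    intro p hp
    induction hp with
    | refl => exact Or.inl hj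
    | tail hb hc ih =>
      rename_i b c
      rcases ih with hbv | hbn
      · obtain ⟨ck, hgb, -, hcl⟩ := hce _ hbv
        rcases hcl with hbA | hclose
        · exact absurd hb (hA _ hbA)
        · refine hclose c ?_
          unfold childs at hc
          rwa [hgb] at hc
      · unfold childs at hc
        rw [hbn] at hc
        cases hc
  intro p hp cp hcp
  rcases key p hp with hpv | hpn
  · obtain ⟨ck, hg, hu, -⟩ := hce _ hpv
    rw [hcp] at hg
    injection hg with hg
    rw [← hg] at hu
    exact hu
  · rw [hcp] at hpn; cases hpn

-- ---------- unfolding lemmas for bloop ----------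

theorem bloop_nil (file : DK) (v : PySem.Set String) (d : DK) :
    bloop file [] v d = (v, d) := by rw [bloop]

theorem bloop_cons_mem {file : DK} {v : PySem.Set String} {d : DK} {node : String}
    {rest : List String} (h : node ∈ v) :
    bloop file (node :: rest) v d = bloop file rest v d := by
  rw [bloop]; simp [h]

theorem bloop_cons_none {file : DK} {v : PySem.Set String} {d : DK} {node : String}
    {rest : List String} (h : node ∉ v) (h2 : file.get? node = none) :
    bloop file (node :: rest) v d = bloop file rest v d := by
  rw [bloop]; simp [h]; split <;> simp_all

theorem bloop_cons_some {file : DK} {v : PySem.Set String} {d : DK} {node : String}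
    {rest : List String} {cs : List String} (h : node ∉ v)
    (h2 : file.get? node = some cs) :
    bloop file (node :: rest) v d
      = bloop file (cs.reverse ++ rest) (v.add node) (d.insert node cs) := by
  rw [bloop]; simp [h]; split <;> simp_all

theorem bloop_append (file : DK) (s1 : List String) (v : PySem.Set String) (d : DK) :
    ∀ s2, bloop file (s1 ++ s2) v d
      = bloop file s2 (bloop file s1 v d).1 (bloop file s1 v d).2 := by
  induction s1, v, d using bloop.induct (file := file) with
  | case1 v d => intro s2; rw [List.nil_append, bloop_nil]
  | case2 v d node rest hmem ih =>
    intro s2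
    have h : node ∈ v := (contains_true_iff v node).mp hmem
    rw [List.cons_append, bloop_cons_mem h, bloop_cons_mem h, ih]
  | case3 v d node rest hmem hg ih =>
    intro s2
    have h : node ∉ v := (contains_false_iff v node).mp (by simpa using hmem)
    rw [List.cons_append, bloop_cons_none h hg, bloop_cons_none h hg, ih]
  | case4 v d node rest hmem cs hg ih =>
    intro s2
    have h : node ∉ v := (contains_false_iff v node).mp (by simpa using hmem)
    rw [List.cons_append, bloop_cons_some h hg, bloop_cons_some h hg,
      ← List.append_assoc, ih]

-- ---------- A-side loop characterisations ----------

theorem mem_key_get?_isSome {file : DK} {e : String × List String}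
    (he : e ∈ file.items) : ∃ cv, file.get? e.1 = some cv := by
  cases hfind : List.find? (fun p => p.1 == e.1) file.items with
  | none =>
    have h := List.find?_eq_none.mp hfind e he
    simp at h
  | some q => exact ⟨q.2, by unfold PySem.Dict.get?; rw [hfind]; rfl⟩

theorem loop_nomatch (fu : Nat) (file : DK) (entries : List (String × List String))
    (d : DK) (c : String) (h : ∀ e ∈ entries, e.1 ≠ c) :
    trovaLoop fu file entries d c = (some d, d) := by
  induction entries with
  | nil => rw [trovaLoop]
  | cons e rest ih =>
    obtain ⟨f, q⟩ := e
    rw [trovaLoop]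
    simp only
    rw [if_neg (h (f, q) List.mem_cons_self),
      ih (fun e he => h e (List.mem_cons_of_mem _ he))]

theorem loop_prefix (fu : Nat) (file : DK) (pre rest : List (String × List String))
    (d : DK) (c : String) (h : ∀ e ∈ pre, e.1 ≠ c) :
    trovaLoop fu file (pre ++ rest) d c = trovaLoop fu file rest d c := by
  induction pre with
  | nil => rfl
  | cons e p ih =>
    obtain ⟨f, q⟩ := e
    rw [List.cons_append, trovaLoop]
    simp only
    rw [if_neg (h (f, q) List.mem_cons_self),
      ih (fun e he => h e (List.mem_cons_of_mem _ he))]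

theorem loop_match_step (fu : Nat) (file : DK) (q : List String)
    (rest : List (String × List String)) (d : DK) (c : String) (cc : List String)
    (hg : file.get? c = some cc) :
    trovaLoop fu file ((c, q) :: rest) d c
      = (if cc = [] then (none, d.insert c cc)
         else trovaLoop fu file rest (trovaKids fu file cc.reverse (d.insert c cc)) c) := by
  have hgd : file.getD c [] = cc := by
    rw [PySem.Dict.getD_eq_get?_getD, hg]; rfl
  rw [trovaLoop]
  simp [hgd]

-- ---------- A's re-traversal of finished nodes is a no-op ----------

theorem N_kids (file : DK) (fu : Nat)
    (Hrec : ∀ (d : DK) c, DoneD file d c → (trovaRec fu file d c).2 = d) :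
    ∀ cs (d : DK), (∀ c ∈ cs, DoneD file d c) → trovaKids fu file cs d = d := by
  intro cs
  induction cs with
  | nil => intro d _; rw [trovaKids]
  | cons c rest ih =>
    intro d h
    rw [trovaKids]
    rw [Hrec d c (h c List.mem_cons_self)]
    exact ih d (fun c' hc' => h c' (List.mem_cons_of_mem _ hc'))

theorem N_loop (file : DK) (fu : Nat)
    (Hrec : ∀ (d : DK) c, DoneD file d c → (trovaRec fu file d c).2 = d) :
    ∀ entries (d : DK) c, (∀ e ∈ entries, e ∈ file.items) → DoneD file d c →
      (trovaLoop fu file entries d c).2 = d := by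
  intro entries
  induction entries with
  | nil => intro d c _ _; rw [trovaLoop]
  | cons e rest ih =>
    intro d c hsub hdone
    obtain ⟨f, q⟩ := e
    by_cases hf : f = c
    · subst hf
      obtain ⟨cv, hg⟩ := mem_key_get?_isSome (hsub (f, q) List.mem_cons_self)
      have hu : Uniform d f cv := hdone f (Reach.refl f) cv hg
      have hins : d.insert f cv = d := insert_noop hu
      rw [loop_match_step fu file q rest d f cv hg]
      by_cases hcv : cv = []
      · rw [if_pos hcv]
        exact hins
      · rw [if_neg hcv, hins]
        have hkids : trovaKids fu file cv.reverse d = d := by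
          apply N_kids file fu Hrec
          intro j hj
          refine doneD_mono_reach hdone (Reach.single ?_)
          unfold childs
          rw [hg]
          exact (List.mem_reverse).mp hj
        rw [hkids]
        exact ih d f (fun e he => hsub e (List.mem_cons_of_mem _ he)) hdone
    · rw [trovaLoop]
      simp only
      rw [if_neg hf]
      exact ih d c (fun e he => hsub e (List.mem_cons_of_mem _ he)) hdone

theorem N_rec (file : DK) :
    ∀ fu (d : DK) c, DoneD file d c → (trovaRec fu file d c).2 = d := by
  intro fu
  induction fu with
  | zero => intro d c _; rw [trovaRec]
  | succ fu ih =>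
    intro d c h
    rw [trovaRec]
    exact N_loop file fu ih file.items d c (fun e he => he) h

theorem N_loop_fst (file : DK) (fu : Nat) :
    ∀ entries (d : DK) c, (∀ e ∈ entries, e ∈ file.items) → DoneD file d c →
      (∀ cp, file.get? c = some cp → cp ≠ []) →
      trovaLoop fu file entries d c = (some d, d) := by
  intro entries
  induction entries with
  | nil => intro d c _ _ _; rw [trovaLoop]
  | cons e rest ih =>
    intro d c hsub hdone hne
    obtain ⟨f, q⟩ := e
    by_cases hf : f = c
    · subst hf
      obtain ⟨cv, hg⟩ := mem_key_get?_isSome (hsub (f, q) List.mem_cons_self)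
      have hu : Uniform d f cv := hdone f (Reach.refl f) cv hg
      have hins : d.insert f cv = d := insert_noop hu
      rw [loop_match_step fu file q rest d f cv hg, if_neg (hne cv hg), hins]
      have hkids : trovaKids fu file cv.reverse d = d := by
        apply N_kids file fu (fun d c h => N_rec file fu d c h)
        intro j hj
        refine doneD_mono_reach hdone (Reach.single ?_)
        unfold childs
        rw [hg]
        exact (List.mem_reverse).mp hj
      rw [hkids]
      exact ih d f (fun e he => hsub e (List.mem_cons_of_mem _ he)) hdone hne
    · rw [trovaLoop]
      simp only
      rw [if_neg hf]
      exact ih d c (fun e he => hsub e (List.mem_cons_of_mem _ he)) hdone hne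

-- ---------- the synchronised induction: one A-call = one singleton bloop ----------

def SOne (file : DK) (x : String) (n : Nat) : Prop :=
  ∀ fuel c (v : PySem.Set String) (d : DK) (A : List String),
    UCount file v ≤ n → n + 1 ≤ fuel →
    ClosedE file v d A →
    Reach file x c → (∀ a ∈ A, Reach file x a ∧ RP file a c) →
    (trovaRec fuel file d c).2 = (bloop file [c] v d).2 ∧
    ClosedE file (bloop file [c] v d).1 (bloop file [c] v d).2 A ∧
    (c ∈ (bloop file [c] v d).1 ∨ file.get? c = none) ∧
    (∀ y ∈ v, y ∈ (bloop file [c] v d).1)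

theorem SFold (file : DK) (x : String) (n : Nat)
    (hS : SOne file x n) :
    ∀ (kids : List String) fuel (v : PySem.Set String) (d : DK) (A : List String),
      UCount file v ≤ n → n + 1 ≤ fuel → ClosedE file v d A →
      (∀ a ∈ A, Reach file x a) →
      (∀ j ∈ kids, Reach file x j ∧ ∀ a ∈ A, RP file a j) →
      trovaKids fuel file kids d = (bloop file kids v d).2 ∧
      ClosedE file (bloop file kids v d).1 (bloop file kids v d).2 A ∧
      (∀ j ∈ kids, j ∈ (bloop file kids v d).1 ∨ file.get? j = none) ∧
      (∀ y ∈ v, y ∈ (bloop file kids v d).1) := by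
  intro kids
  induction kids with
  | nil =>
    intro fuel v d A hU hfuel hce hA hkids
    rw [bloop_nil]
    exact ⟨by rw [trovaKids], hce, by simp, fun y hy => hy⟩
  | cons j rest ih =>
    intro fuel v d A hU hfuel hce hA hkids
    have hone := hS fuel j v d A hU hfuel hce (hkids j List.mem_cons_self).1
      (fun a ha => ⟨hA a ha, (hkids j List.mem_cons_self).2 a ha⟩)
    obtain ⟨heq1, hce1, hj1, hmono1⟩ := hone
    have hsplit : bloop file (j :: rest) v d
        = bloop file rest (bloop file [j] v d).1 (bloop file [j] v d).2 := by
      have h := bloop_append file [j] v d rest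
      simpa using h
    have hU1 : UCount file (bloop file [j] v d).1 ≤ n :=
      le_trans (UCount_le_of_subset file v _ hmono1) hU
    have hrest := ih fuel (bloop file [j] v d).1 (bloop file [j] v d).2 A hU1 hfuel
      hce1 hA (fun j' hj' => hkids j' (List.mem_cons_of_mem _ hj'))
    obtain ⟨heq2, hce2, hj2, hmono2⟩ := hrest
    rw [hsplit]
    refine ⟨?_, hce2, ?_, ?_⟩
    · rw [trovaKids]
      rw [heq1, heq2]
    · intro j' hj'
      rcases List.mem_cons.mp hj' with rfl | hj'r
      · rcases hj1 with hjv | hjn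
        · exact Or.inl (hmono2 j' hjv)
        · exact Or.inr hjn
      · exact hj2 j' hj'r
    · intro y hy
      exact hmono2 y (hmono1 y hy)

theorem SOne_all (file : DK) (x : String)
    (Hac : ∀ k, Reach file x k → ¬ RP file k k) : ∀ n, SOne file x n := by
  intro n
  induction n using Nat.strong_induction_on with
  | _ n IH =>
  intro fuel c v d A hU hfuel hce hxc hA
  by_cases hcv : c ∈ v
  · -- already visited: B skips, A's re-traversal is a no-op
    have hnoR : ∀ a ∈ A, ¬ Reach file c a := by
      intro a ha hr
      obtain ⟨hxa, m, hm, hmc⟩ := hA a ha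
      exact Hac a hxa ⟨m, hm, hmc.trans hr⟩
    have hDone : DoneD file d c := doneOf hce hcv hnoR
    rw [bloop_cons_mem hcv, bloop_nil]
    exact ⟨N_rec file fuel d c hDone, hce, Or.inl hcv, fun y hy => hy⟩
  · cases hg : file.get? c with
    | none =>
      rw [bloop_cons_none hcv hg, bloop_nil]
      refine ⟨?_, hce, Or.inr rfl, fun y hy => hy⟩
      cases fuel with
      | zero => omega
      | succ fu =>
        rw [trovaRec]
        rw [loop_nomatch fu file file.items d c ?_]
        intro e he
        rintro rfl
        obtain ⟨cv, hcv'⟩ := mem_key_get?_isSome he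
        rw [hg] at hcv'
        cases hcv'
    | some cc =>
      cases fuel with
      | zero => omega
      | succ fu =>
      have hchilds : childs file c = cc := by unfold childs; rw [hg]; rfl
      -- decompose file.items at the first entry with key c
      obtain ⟨p, hpeq, pre, post, hitems, hpre⟩ : ∃ p, (p.1 == c) = true ∧
          ∃ as bs, file.items = as ++ p :: bs ∧ ∀ a ∈ as, (!(a.1 == c)) = true := by
        unfold PySem.Dict.get? at hg
        cases hfind : List.find? (fun p => p.1 == c) file.items with
        | none => rw [hfind] at hg; cases hg
        | some q =>
          obtain ⟨h1, as, bs, h2, h3⟩ := List.find?_eq_some_iff_append.mp hfind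
          exact ⟨q, h1, as, bs, h2, h3⟩
      have hpkey : p.1 = c := by simpa using hpeq
      have hprene : ∀ e ∈ pre, e.1 ≠ c := by
        intro e he
        have h := hpre e he
        simpa using h
      obtain ⟨p1, p2⟩ := p
      simp only at hpkey
      subst hpkey
      -- B's step
      have hBstep : bloop file [p1] v d
          = bloop file cc.reverse (v.add p1) (d.insert p1 cc) := by
        rw [bloop_cons_some hcv hg]
        simp
      by_cases hccnil : cc = []
      · -- childless first visit: A returns None early, B pushes nothing
        subst hccnil
        have hAside : (trovaRec (fu + 1) file d p1).2 = d.insert p1 [] := by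
          rw [trovaRec]
          rw [hitems, loop_prefix fu file pre _ d p1 hprene,
            loop_match_step fu file p2 post d p1 [] hg, if_pos rfl]
        rw [hBstep, List.reverse_nil, bloop_nil]
        refine ⟨by simpa using hAside, ?_, Or.inl ?_, ?_⟩
        · intro k hk
          rcases (PySem.Set.mem_add v p1 k).mp hk with hkv | rfl
          · obtain ⟨ck, hgk, hu, hcl⟩ := hce k hkv
            have hkne : k ≠ p1 := fun hh => hcv (hh ▸ hkv)
            refine ⟨ck, hgk, uniform_insert_other p1 [] hkne hu, ?_⟩
            rcases hcl with hkA | hclose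
            · exact Or.inl hkA
            · refine Or.inr (fun j hj => ?_)
              rcases hclose j hj with hjv | hjn
              · exact Or.inl ((PySem.Set.mem_add v p1 j).mpr (Or.inl hjv))
              · exact Or.inr hjn
          · exact ⟨[], hg, uniform_insert d k [], Or.inr (by simp)⟩
        · exact (PySem.Set.mem_add v p1 p1).mpr (Or.inr rfl)
        · intro y hy
          exact (PySem.Set.mem_add v p1 y).mpr (Or.inl hy)
      · -- first visit of a key with children
        have hUlt : UCount file (v.add p1) < UCount file v :=
          UCount_add_lt file v p1 cc ((contains_false_iff v p1).mpr hcv) hg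
        have hn1 : 1 ≤ n := by omega
        have hce1 : ClosedE file (v.add p1) (d.insert p1 cc) (p1 :: A) := by
          intro k hk
          rcases (PySem.Set.mem_add v p1 k).mp hk with hkv | rfl
          · obtain ⟨ck, hgk, hu, hcl⟩ := hce k hkv
            have hkne : k ≠ p1 := fun hh => hcv (hh ▸ hkv)
            refine ⟨ck, hgk, uniform_insert_other p1 cc hkne hu, ?_⟩
            rcases hcl with hkA | hclose
            · exact Or.inl (List.mem_cons_of_mem _ hkA)
            · refine Or.inr (fun j hj => ?_)
              rcases hclose j hj with hjv | hjn
              · exact Or.inl ((PySem.Set.mem_add v p1 j).mpr (Or.inl hjv))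
              · exact Or.inr hjn
          · exact ⟨cc, hg, uniform_insert d k cc, Or.inl List.mem_cons_self⟩
        have hkidsfacts : ∀ j ∈ cc.reverse, Reach file x j ∧
            ∀ a ∈ p1 :: A, RP file a j := by
          intro j hj
          have hjcc : j ∈ childs file p1 := by
            rw [hchilds]; exact List.mem_reverse.mp hj
          refine ⟨hxc.tail hjcc, ?_⟩
          intro a ha
          rcases List.mem_cons.mp ha with rfl | haA
          · exact ⟨j, hjcc, Reach.refl j⟩
          · obtain ⟨-, m, hm, hmc⟩ := hA a haA
            exact ⟨m, hm, hmc.tail hjcc⟩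
        have hA1 : ∀ a ∈ p1 :: A, Reach file x a := by
          intro a ha
          rcases List.mem_cons.mp ha with rfl | haA
          · exact hxc
          · exact (hA a haA).1
        have hfold := SFold file x (n - 1) (IH (n - 1) (by omega))
          cc.reverse fu (v.add p1) (d.insert p1 cc) (p1 :: A) (by omega) (by omega)
          hce1 hA1 hkidsfacts
        obtain ⟨heqk, hce2, hj2, hmono2⟩ := hfold
        have hcv2 : p1 ∈ (bloop file cc.reverse (v.add p1) (d.insert p1 cc)).1 :=
          hmono2 p1 ((PySem.Set.mem_add v p1 p1).mpr (Or.inr rfl))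
        -- rebuild the invariant with p1 closed
        have hceA : ClosedE file (bloop file cc.reverse (v.add p1) (d.insert p1 cc)).1
            (bloop file cc.reverse (v.add p1) (d.insert p1 cc)).2 A := by
          intro k hk
          obtain ⟨ck, hgk, hu, hcl⟩ := hce2 k hk
          rcases hcl with hkA | hclose
          · rcases List.mem_cons.mp hkA with rfl | hkA'
            · refine ⟨ck, hgk, hu, Or.inr ?_⟩
              have hckcc : ck = cc := by
                rw [hg] at hgk; injection hgk with hh; exact hh.symm
              subst hckcc
              intro j hj
              exact hj2 j (List.mem_reverse.mpr hj)
            · exact ⟨ck, hgk, hu, Or.inl hkA'⟩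
          · exact ⟨ck, hgk, hu, Or.inr hclose⟩
        have hnoR2 : ∀ a ∈ A, ¬ Reach file p1 a := by
          intro a ha hr
          obtain ⟨hxa, m, hm, hmc⟩ := hA a ha
          exact Hac a hxa ⟨m, hm, hmc.trans hr⟩
        have hdone2 : DoneD file
            (bloop file cc.reverse (v.add p1) (d.insert p1 cc)).2 p1 :=
          doneOf hceA hcv2 hnoR2
        have hpost : ∀ e ∈ post, e ∈ file.items := by
          intro e he
          rw [hitems]
          exact List.mem_append_right _ (List.mem_cons_of_mem _ he)
        have hAside : (trovaRec (fu + 1) file d p1).2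
            = (bloop file cc.reverse (v.add p1) (d.insert p1 cc)).2 := by
          rw [trovaRec]
          rw [hitems, loop_prefix fu file pre _ d p1 hprene,
            loop_match_step fu file p2 post d p1 cc hg, if_neg hccnil, heqk]
          exact N_loop file fu (fun d c h => N_rec file fu d c h) post _ p1 hpost hdone2
        rw [hBstep]
        refine ⟨hAside, hceA, Or.inl hcv2, ?_⟩
        intro y hy
        exact hmono2 y ((PySem.Set.mem_add v p1 y).mpr (Or.inl hy))

theorem top_assemble (file diz : List (String × List String)) (x : String)
    (hpre : Pre_trova file diz x) :
    (trovaRec (file.length + 1) (PySem.Dict.mk file) (PySem.Dict.mk diz) x).1.map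
      PySem.Dict.items = trova_alt file diz x := by
  have Hac := acyc_of_pre hpre
  cases hg : (PySem.Dict.mk file).get? x with
  | none =>
    have hA : trovaRec (file.length + 1) (PySem.Dict.mk file) (PySem.Dict.mk diz) x
        = (some (PySem.Dict.mk diz), PySem.Dict.mk diz) := by
      rw [trovaRec]
      apply loop_nomatch
      intro e he
      rintro rfl
      obtain ⟨cv, hcv⟩ := mem_key_get?_isSome he
      rw [hg] at hcv
      cases hcv
    unfold trova_alt
    rw [hA, hg]
    rfl
  | some cx =>
    -- split file.items at the first entry whose key is x
    obtain ⟨p, hpeq, pre, post, hitems, hpre'⟩ : ∃ p, (p.1 == x) = true ∧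
        ∃ as bs, (PySem.Dict.mk file).items = as ++ p :: bs ∧
          ∀ a ∈ as, (!(a.1 == x)) = true := by
      unfold PySem.Dict.get? at hg
      cases hfind : List.find? (fun p => p.1 == x) (PySem.Dict.mk file).items with
      | none => rw [hfind] at hg; cases hg
      | some q =>
        obtain ⟨h1, as, bs, h2, h3⟩ := List.find?_eq_some_iff_append.mp hfind
        exact ⟨q, h1, as, bs, h2, h3⟩
    obtain ⟨p1, p2⟩ := p
    have hpkey : p1 = x := by simpa using hpeq
    subst hpkey
    have hprene : ∀ e ∈ pre, e.1 ≠ p1 := by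
      intro e he
      have h := hpre' e he
      simpa using h
    by_cases hcx : cx = []
    · subst hcx
      have hA : (trovaRec (file.length + 1) (PySem.Dict.mk file) (PySem.Dict.mk diz)
          p1).1 = none := by
        rw [trovaRec, hitems,
          loop_prefix file.length (PySem.Dict.mk file) pre _ (PySem.Dict.mk diz) p1 hprene,
          loop_match_step file.length (PySem.Dict.mk file) p2 post (PySem.Dict.mk diz)
            p1 [] hg, if_pos rfl]
      unfold trova_alt
      rw [hg]
      simp [hA]
    · -- the interesting case
      have hxv0 : p1 ∈ PySem.Set.add PySem.Set.empty p1 :=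
        (PySem.Set.mem_add _ p1 p1).mpr (Or.inr rfl)
      have hmemx : ((p1, p2) : String × List String) ∈ (PySem.Dict.mk file).items := by
        rw [hitems]; exact List.mem_append_right _ List.mem_cons_self
      have hUlt : UCount (PySem.Dict.mk file) (PySem.Set.add PySem.Set.empty p1)
          < file.length := by
        have h1 := length_filter_lt (PySem.Dict.mk file).items
          (fun p => !((PySem.Set.add PySem.Set.empty p1).contains p.1))
          (fun _ => true) (fun a _ => rfl) (p1, p2) hmemx rfl
          (by simp)
        rw [List.filter_true] at h1
        exact h1
      have hchx : childs (PySem.Dict.mk file) p1 = cx := by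
        unfold childs; rw [hg]; rfl
      have hce0 : ClosedE (PySem.Dict.mk file) (PySem.Set.add PySem.Set.empty p1)
          ((PySem.Dict.mk diz).insert p1 cx) [p1] := by
        intro k hk
        rcases (PySem.Set.mem_add _ p1 k).mp hk with hkv | rfl
        · cases hkv
        · exact ⟨cx, hg, uniform_insert _ k cx, Or.inl List.mem_cons_self⟩
      have hA0 : ∀ a ∈ [p1], Reach (PySem.Dict.mk file) p1 a := by
        intro a ha
        rw [List.mem_singleton] at ha
        subst ha
        exact Reach.refl a
      have hkids0 : ∀ j ∈ cx.reverse, Reach (PySem.Dict.mk file) p1 j ∧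
          ∀ a ∈ [p1], RP (PySem.Dict.mk file) a j := by
        intro j hj
        have hjc : j ∈ childs (PySem.Dict.mk file) p1 := by
          rw [hchx]; exact List.mem_reverse.mp hj
        refine ⟨Reach.single hjc, ?_⟩
        intro a ha
        rw [List.mem_singleton] at ha
        subst ha
        exact ⟨j, hjc, Reach.refl j⟩
      have hfold := SFold (PySem.Dict.mk file) p1
        (UCount (PySem.Dict.mk file) (PySem.Set.add PySem.Set.empty p1))
        (SOne_all (PySem.Dict.mk file) p1 Hac _)
        cx.reverse file.length (PySem.Set.add PySem.Set.empty p1)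
        ((PySem.Dict.mk diz).insert p1 cx) [p1] le_rfl (by omega) hce0 hA0 hkids0
      obtain ⟨heqk, hce2, hj2, hmono2⟩ := hfold
      have hxv2 : p1 ∈ (bloop (PySem.Dict.mk file) cx.reverse
          (PySem.Set.add PySem.Set.empty p1) ((PySem.Dict.mk diz).insert p1 cx)).1 :=
        hmono2 p1 hxv0
      have hceNil : ClosedE (PySem.Dict.mk file)
          (bloop (PySem.Dict.mk file) cx.reverse (PySem.Set.add PySem.Set.empty p1)
            ((PySem.Dict.mk diz).insert p1 cx)).1
          (bloop (PySem.Dict.mk file) cx.reverse (PySem.Set.add PySem.Set.empty p1)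
            ((PySem.Dict.mk diz).insert p1 cx)).2 [] := by
        intro k hk
        obtain ⟨ck, hgk, hu, hcl⟩ := hce2 k hk
        rcases hcl with hkA | hclose
        · rw [List.mem_singleton] at hkA
          subst hkA
          refine ⟨ck, hgk, hu, Or.inr ?_⟩
          have hckcx : ck = cx := by
            rw [hg] at hgk; injection hgk with hh; exact hh.symm
          subst hckcx
          intro j hj
          exact hj2 j (List.mem_reverse.mpr hj)
        · exact ⟨ck, hgk, hu, Or.inr hclose⟩
      have hdone2 : DoneD (PySem.Dict.mk file)
          (bloop (PySem.Dict.mk file) cx.reverse (PySem.Set.add PySem.Set.empty p1)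
            ((PySem.Dict.mk diz).insert p1 cx)).2 p1 :=
        doneOf hceNil hxv2 (by intro a ha; cases ha)
      have hpost : ∀ e ∈ post, e ∈ (PySem.Dict.mk file).items := by
        intro e he
        rw [hitems]
        exact List.mem_append_right _ (List.mem_cons_of_mem _ he)
      have hne : ∀ cp, (PySem.Dict.mk file).get? p1 = some cp → cp ≠ [] := by
        intro cp hcp
        rw [hg] at hcp
        injection hcp with hcp
        rw [← hcp]
        exact hcx
      have hA : trovaRec (file.length + 1) (PySem.Dict.mk file) (PySem.Dict.mk diz) p1
          = (some (bloop (PySem.Dict.mk file) cx.reverse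
              (PySem.Set.add PySem.Set.empty p1)
              ((PySem.Dict.mk diz).insert p1 cx)).2,
             (bloop (PySem.Dict.mk file) cx.reverse
              (PySem.Set.add PySem.Set.empty p1)
              ((PySem.Dict.mk diz).insert p1 cx)).2) := by
        rw [trovaRec, hitems,
          loop_prefix file.length (PySem.Dict.mk file) pre _ (PySem.Dict.mk diz) p1 hprene,
          loop_match_step file.length (PySem.Dict.mk file) p2 post (PySem.Dict.mk diz)
            p1 cx hg, if_neg hcx, heqk]
        exact N_loop_fst (PySem.Dict.mk file) file.length post _ p1 hpost hdone2 hne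
      unfold trova_alt
      rw [hA, hg]
      simp [hcx]

-- ===== VERDICT (by name: the statement is the Claim_ definition above) =====
theorem trova_spec : Claim_equal_trova := by
  unfold Claim_equal_trova
  intro file diz x _ hpre
  unfold Spec_trova trova
  exact top_assemble file diz x hpre
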